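-- pv_equiv track=rewrite | github.com/wazuh/wazuh | src/engine/test/helper_tests/transformation/testCaseGenerator.py | generate_raw_template
-- ===== SOURCE A (Python) =====
-- import itertools
--
-- def get_minimum_arguments(yaml_data):
--     if "arguments" in yaml_data:
--         return len(yaml_data["arguments"])
--     return 0
--
-- def get_sources(yaml_data):
--     sources = []
--     if get_minimum_arguments(yaml_data) != 0:
--         for argument in yaml_data["arguments"].values():
--             if argument["source"]:
--                 sources.append(argument["source"])
--     return sources
--
-- def generate_raw_template(yaml_data, my_sources=[]):
--     sources = []
--     if not my_sources:
--         sources = get_sources(yaml_data)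
--     else:
--         sources = my_sources
--     sources_expanded = []
--     for source in sources:
--         if source == "both":
--             sources_expanded.append(["value", "reference"])
--         else:
--             sources_expanded.append(source)
--
--     # If an element is a list, we treat it as a single element
--     data_processed = [x if isinstance(x, list) else [x] for x in sources_expanded]
--
--     # Generate all possible combinations
--     combinations = list(itertools.product(*data_processed))
--     return combinations
-- ===== SOURCE B (Python) =====
-- def generate_raw_template(yaml_data, my_sources=[]):
--     sources = my_sources or [
--         arg["source"] for arg in yaml_data.get("arguments", {}).values() if arg["source"]
--     ]
--     pools = [
--         ["value", "reference"] if s == "both" else (s if isinstance(s, list) else [s])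
--         for s in sources
--     ]
--     total = 1
--     for p in pools:
--         total *= len(p)
--     result = []
--     for rank in range(total):
--         combo = []
--         r = rank
--         for p in reversed(pools):
--             r, j = divmod(r, len(p))
--             combo.append(p[j])
--         combo.reverse()
--         result.append(tuple(combo))
--     return result
-- ===== Notes on version B (the rewrite author's own statement) =====
-- stated objective: alternative
-- what changed: B builds the pools in one comprehension and replaces itertools.product by mixed-radix rank decoding: for each rank in range(prod(pool lengths)) it decodes the rank's digits over the reversed pools with divmod and emits that tuple directly, instead of A's recursive product over preprocessed pools; this also avoids materialising growing intermediate tuples.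
import Mathlib
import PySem

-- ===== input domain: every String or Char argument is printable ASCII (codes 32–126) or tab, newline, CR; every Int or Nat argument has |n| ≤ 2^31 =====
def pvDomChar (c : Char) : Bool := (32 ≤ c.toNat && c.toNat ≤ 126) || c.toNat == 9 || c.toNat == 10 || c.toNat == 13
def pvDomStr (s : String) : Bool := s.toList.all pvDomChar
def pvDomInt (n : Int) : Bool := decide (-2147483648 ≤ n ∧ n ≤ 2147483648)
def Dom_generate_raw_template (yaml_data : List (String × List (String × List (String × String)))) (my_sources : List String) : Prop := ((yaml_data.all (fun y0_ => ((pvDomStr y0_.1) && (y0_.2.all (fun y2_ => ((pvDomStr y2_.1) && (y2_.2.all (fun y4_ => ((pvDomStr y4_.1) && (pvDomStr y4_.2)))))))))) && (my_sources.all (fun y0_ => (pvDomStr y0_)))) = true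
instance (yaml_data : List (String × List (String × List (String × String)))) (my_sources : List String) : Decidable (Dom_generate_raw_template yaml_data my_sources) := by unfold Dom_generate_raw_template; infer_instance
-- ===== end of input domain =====

-- B builds each combination directly by mixed-radix decoding of its rank (odometer), with the
-- pools made in one comprehension, instead of A's itertools.product over preprocessed pools
-- (objective: alternative).

-- ===== PORT A =====
-- get_minimum_arguments(yaml_data)
def pvGetMinimumArguments (yaml_data : List (String × List (String × List (String × String)))) : Int :=
  let d := PySem.Dict.ofList yaml_data
  if d.contains "arguments" then
    (PySem.Dict.ofList (d.getD "arguments" [])).size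
  else 0

-- get_sources(yaml_data); argument["source"] raises KeyError when the key is absent —
-- those inputs are excluded by Pre_; the port reads getD "source" "" there (unclaimed).
def pvGetSources (yaml_data : List (String × List (String × List (String × String)))) : List String :=
  let sources : List String := []
  if pvGetMinimumArguments yaml_data ≠ 0 then
    (PySem.Dict.ofList ((PySem.Dict.ofList yaml_data).getD "arguments" [])).values.foldl
      (fun acc argument =>
        let s := (PySem.Dict.ofList argument).getD "source" ""
        if s ≠ "" then acc ++ [s] else acc) sources
  else sources

-- itertools.product(*data_processed), hand-ported step for step (exact: Python's product
-- pairs each element of the first pool with every tuple of the product of the rest)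
def pvItertoolsProduct : List (List String) → List (List String)
  | [] => [[]]
  | p :: rest => p.flatMap (fun x => (pvItertoolsProduct rest).map (fun t => x :: t))

-- in the typed model every source is a String; a source that was already a list can only
-- arise from the "both" expansion, modelled by Sum.inr as A's sources_expanded mixes types
def generate_raw_template (yaml_data : List (String × List (String × List (String × String)))) (my_sources : List String) : List (List String) :=
  let sources := if my_sources = [] then pvGetSources yaml_data else my_sources
  let sources_expanded : List (Sum String (List String)) :=
    sources.foldl (fun acc source =>
      if source == "both" then acc ++ [Sum.inr ["value", "reference"]]
      else acc ++ [Sum.inl source]) []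
  let data_processed : List (List String) :=
    sources_expanded.map (fun x => match x with | .inr l => l | .inl s => [s])
  pvItertoolsProduct data_processed

-- ===== PORT B =====
-- isinstance(s, list) is never true for the typed model's String sources; p[j] always has
-- 0 ≤ j < len(p) when reached (total > 0), ported with pyGetD "" (exact there)
def generate_raw_template_alt (yaml_data : List (String × List (String × List (String × String)))) (my_sources : List String) : List (List String) :=
  let sources :=
    if my_sources ≠ [] then my_sources
    else ((PySem.Dict.ofList ((PySem.Dict.ofList yaml_data).getD "arguments" [])).values.filter
            (fun arg => (PySem.Dict.ofList arg).getD "source" "" ≠ "")).map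
            (fun arg => (PySem.Dict.ofList arg).getD "source" "")
  let pools := sources.map (fun s => if s == "both" then ["value", "reference"] else [s])
  let total := pools.foldl (fun t p => t * (p.length : Int)) 1
  (PySem.List.pyRange 0 total 1).map (fun rank =>
    let st := pools.reverse.foldl
      (fun (st : Int × List String) p =>
        (PySem.Int.floordiv st.1 (p.length : Int),
         st.2 ++ [PySem.List.pyGetD p (PySem.Int.mod st.1 (p.length : Int)) ""]))
      (rank, ([] : List String))
    st.2.reverse)

-- ===== PRECONDITION & SPEC =====
-- Pre_ excludes exactly the inputs where A raises KeyError: my_sources empty and some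
-- argument dict under "arguments" lacks the key "source".
def Pre_generate_raw_template (yaml_data : List (String × List (String × List (String × String)))) (my_sources : List String) : Prop :=
  my_sources ≠ [] ∨
    (PySem.Dict.ofList ((PySem.Dict.ofList yaml_data).getD "arguments" [])).values.all
      (fun argument => (PySem.Dict.ofList argument).contains "source") = true
instance (yaml_data : List (String × List (String × List (String × String)))) (my_sources : List String) : Decidable (Pre_generate_raw_template yaml_data my_sources) := by unfold Pre_generate_raw_template; infer_instance

def pvWitness_generate_raw_template : (List (String × List (String × List (String × String)))) × List String :=
  ([("arguments", [("a", [("source", "both")]), ("b", [("source", "value")])])], [])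

def Spec_generate_raw_template (yaml_data : List (String × List (String × List (String × String)))) (my_sources : List String) (out : List (List String)) : Prop := out = generate_raw_template_alt yaml_data my_sources
instance (yaml_data : List (String × List (String × List (String × String)))) (my_sources : List String) (out : List (List String)) : Decidable (Spec_generate_raw_template yaml_data my_sources out) := by unfold Spec_generate_raw_template; infer_instance

-- ===== CLAIM (what is proved, stated in full; the proofs are below) =====
def Claim_equal_generate_raw_template : Prop := ∀ (yaml_data : List (String × List (String × List (String × String)))) (my_sources : List String), Dom_generate_raw_template yaml_data my_sources → Pre_generate_raw_template yaml_data my_sources → Spec_generate_raw_template yaml_data my_sources (generate_raw_template yaml_data my_sources)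

-- ===== LEMMAS AND PROOFS =====

-- a dict of size 0 has no values (used for A's get_minimum_arguments guard)
theorem pv_values_eq_nil (d : PySem.Dict String (List (String × String))) (h : d.size = 0) :
    d.values = [] := by
  cases d with | mk items =>
  simp only [PySem.Dict.size, List.length_eq_zero_iff] at h
  simp [PySem.Dict.values, h]

-- A's append-if loop over the argument dicts equals B's filter-then-map comprehension
theorem pv_sources_loop_eq (args : List (List (String × String))) (acc : List String) :
    args.foldl (fun acc argument =>
        let s := (PySem.Dict.ofList argument).getD "source" ""
        if s ≠ "" then acc ++ [s] else acc) acc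
      = acc ++ (args.filter (fun arg => (PySem.Dict.ofList arg).getD "source" "" ≠ "")).map
            (fun arg => (PySem.Dict.ofList arg).getD "source" "") := by
  induction args generalizing acc with
  | nil => simp
  | cons a rest ih =>
    simp only [List.foldl_cons, List.filter_cons, ih]
    by_cases h : (PySem.Dict.ofList a).getD "source" "" = ""
    · simp [h]
    · simp [h]

-- A's expansion loop followed by the wrapping pass equals B's single pools comprehension
theorem pv_pools_eq (sources : List String) (acc : List (Sum String (List String))) :
    (sources.foldl (fun acc source =>
        if source == "both" then acc ++ [Sum.inr ["value", "reference"]]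
        else acc ++ [Sum.inl source]) acc).map
        (fun x => match x with | .inr l => l | .inl s => [s])
      = acc.map (fun x => match x with | .inr l => l | .inl s => [s])
        ++ sources.map (fun s => if s == "both" then ["value", "reference"] else [s]) := by
  induction sources generalizing acc with
  | nil => simp
  | cons s rest ih =>
    simp only [List.foldl_cons, ih]
    by_cases h : s = "both"
    · simp [h]
    · simp [h]

-- the number of combinations: the product of the pool lengths
def pvProdLen (pools : List (List String)) : Nat := (pools.map List.length).prod

theorem pv_total_eq (pools : List (List String)) (a : Int) :
    pools.foldl (fun t p => t * (p.length : Int)) a = a * (pvProdLen pools : Int) := by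
  induction pools generalizing a with
  | nil => simp [pvProdLen]
  | cons p rest ih =>
    simp only [List.foldl_cons, ih, pvProdLen, List.map_cons, List.prod_cons]
    push_cast
    ring

theorem pv_prodLen_pos (pools : List (List String)) (h : ∀ p ∈ pools, p ≠ []) :
    0 < pvProdLen pools := by
  induction pools with
  | nil => simp [pvProdLen]
  | cons p rest ih =>
    have hp : p ≠ [] := h p (by simp)
    have : 0 < p.length := List.length_pos_iff.mpr hp
    simpa [pvProdLen] using Nat.mul_pos this (ih (fun q hq => h q (by simp [hq])))

theorem pv_length_product (pools : List (List String)) :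
    (pvItertoolsProduct pools).length = pvProdLen pools := by
  induction pools with
  | nil => simp [pvItertoolsProduct, pvProdLen]
  | cons p rest ih =>
    simp [pvItertoolsProduct, pvProdLen, List.length_flatMap, ih, List.map_const', List.sum_replicate, smul_eq_mul]

-- indexing a flatMap whose blocks all have length m
theorem pv_getElem?_flatMap {α β : Type} (l : List α) (f : α → List β) (m : Nat)
    (hm : ∀ x ∈ l, (f x).length = m) (i j : Nat) (hi : i < l.length) (hj : j < m) :
    (l.flatMap f)[i * m + j]? = (f (l[i]'hi))[j]? := by
  induction l generalizing i with
  | nil => simp at hi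
  | cons x xs ih =>
    cases i with
    | zero =>
      simp only [List.flatMap_cons, List.getElem_cons_zero, Nat.zero_mul, Nat.zero_add]
      exact List.getElem?_append_left (by rw [hm x (by simp)]; exact hj)
    | succ i =>
      have hx : (f x).length = m := hm x (by simp)
      have hle : (f x).length ≤ (i + 1) * m + j := by rw [hx]; nlinarith
      rw [List.flatMap_cons, List.getElem?_append_right hle]
      have harith : (i + 1) * m + j - (f x).length = i * m + j := by rw [hx]; ring_nf; omega
      rw [harith, List.getElem_cons_succ]
      exact ih (fun y hy => hm y (by simp [hy])) i (by simpa using hi)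

-- the odometer: decoding rank q·T + s over pools of total size T yields carry q and the
-- reversed s-th tuple of the product
theorem pv_decode (pools : List (List String)) (h : ∀ p ∈ pools, p ≠ []) (q s : Nat)
    (hs : s < pvProdLen pools) :
    pools.foldr (fun p st =>
        (PySem.Int.floordiv st.1 (p.length : Int),
         st.2 ++ [PySem.List.pyGetD p (PySem.Int.mod st.1 (p.length : Int)) ""]))
      (((q * pvProdLen pools + s : Nat) : Int), ([] : List String))
      = ((q : Int), (((pvItertoolsProduct pools)[s]?).getD []).reverse) := by
  induction pools generalizing q s with
  | nil =>
    have hs0 : s = 0 := by simpa [pvProdLen] using hs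
    subst hs0
    simp [pvProdLen, pvItertoolsProduct]
  | cons p rest ih =>
    have hTr : 0 < pvProdLen rest := pv_prodLen_pos rest (fun q hq => h q (by simp [hq]))
    have hplen : 0 < p.length := List.length_pos_iff.mpr (h p (by simp))
    have hcons : pvProdLen (p :: rest) = p.length * pvProdLen rest := by
      simp [pvProdLen]
    obtain ⟨i, sr, hi, hsr, rfl⟩ :
        ∃ i sr, i < p.length ∧ sr < pvProdLen rest ∧ s = i * pvProdLen rest + sr := by
      refine ⟨s / pvProdLen rest, s % pvProdLen rest, ?_, Nat.mod_lt _ hTr, ?_⟩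
      · exact (Nat.div_lt_iff_lt_mul hTr).mpr (by rw [hcons] at hs; omega)
      · rw [Nat.mul_comm]
        exact (Nat.div_add_mod s _).symm
    have hrank : q * pvProdLen (p :: rest) + (i * pvProdLen rest + sr)
        = (q * p.length + i) * pvProdLen rest + sr := by rw [hcons]; ring
    rw [List.foldr_cons, hrank, ih (fun q hq => h q (by simp [hq])) (q * p.length + i) sr hsr]
    have hdiv : (q * p.length + i) / p.length = q := by
      rw [Nat.mul_comm q p.length, Nat.mul_add_div hplen, Nat.div_eq_of_lt hi, Nat.add_zero]
    have hmod : (q * p.length + i) % p.length = i := Nat.mul_add_mod_of_lt hi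
    have hq' : PySem.Int.floordiv ((q * p.length + i : Nat) : Int) (p.length : Int) = (q : Int) := by
      rw [PySem.Int.floordiv_natCast, hdiv]
    have hj' : PySem.Int.mod ((q * p.length + i : Nat) : Int) (p.length : Int) = ((i : Nat) : Int) := by
      rw [PySem.Int.mod_natCast, hmod]
    have hget : PySem.List.pyGetD p ((i : Nat) : Int) "" = p[i]'hi := by
      rw [PySem.List.pyGetD_natCast, List.getD_eq_getElem p "" hi]
    have hsplit : (pvItertoolsProduct (p :: rest))[i * pvProdLen rest + sr]?
        = ((pvItertoolsProduct rest)[sr]?).map (fun t => p[i]'hi :: t) := by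
      show (p.flatMap fun x => (pvItertoolsProduct rest).map (fun t => x :: t))[i * pvProdLen rest + sr]? = _
      rw [pv_getElem?_flatMap p _ (pvProdLen rest)
        (fun x _ => by rw [List.length_map, pv_length_product]) i sr hi hsr]
      simp [List.getElem?_map]
    have hv : (pvItertoolsProduct rest)[sr]?
        = some ((pvItertoolsProduct rest)[sr]'(by rw [pv_length_product]; exact hsr)) :=
      List.getElem?_eq_getElem _
    rw [hsplit, hv]
    simp only [Prod.mk.injEq, Option.map_some, Option.getD_some, List.reverse_cons]
    exact ⟨hq', by rw [hj', hget]⟩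

-- B's rank-decoding map over range(total) enumerates exactly A's product, in order
theorem pv_product_eq_decode (pools : List (List String)) (hne : ∀ p ∈ pools, p ≠ []) :
    (PySem.List.pyRange 0 (pools.foldl (fun t p => t * (p.length : Int)) 1) 1).map (fun rank =>
        let st := pools.reverse.foldl
          (fun (st : Int × List String) p =>
            (PySem.Int.floordiv st.1 (p.length : Int),
             st.2 ++ [PySem.List.pyGetD p (PySem.Int.mod st.1 (p.length : Int)) ""]))
          (rank, ([] : List String))
        st.2.reverse)
      = pvItertoolsProduct pools := by
  rw [pv_total_eq, one_mul, PySem.List.pyRange_zero_natCast, List.map_map]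
  apply List.ext_getElem?
  intro n
  rw [List.getElem?_map]
  by_cases hn : n < pvProdLen pools
  · rw [List.getElem?_range hn]
    have hd := pv_decode pools hne 0 n hn
    simp only [Nat.zero_mul, Nat.zero_add] at hd
    have hv : (pvItertoolsProduct pools)[n]?
        = some ((pvItertoolsProduct pools)[n]'(by rw [pv_length_product]; exact hn)) :=
      List.getElem?_eq_getElem _
    simp only [Option.map_some, Function.comp_def, List.foldl_reverse, hd, hv]
    simp
  · rw [List.getElem?_eq_none (by simpa using hn), List.getElem?_eq_none
      (by rw [pv_length_product]; omega)]
    simp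
-- ===== VERDICT (by name: the statement is the Claim_ definition above) =====
theorem generate_raw_template_spec : Claim_equal_generate_raw_template := by
  intro yaml_data my_sources _ _
  unfold Spec_generate_raw_template generate_raw_template generate_raw_template_alt pvGetSources pvGetMinimumArguments
  have hne : ∀ (S : List String), ∀ p ∈ S.map (fun s => if s == "both" then ["value", "reference"] else [s]), p ≠ ([] : List String) := by
    intro S p hp
    rcases List.mem_map.1 hp with ⟨s, _, rfl⟩
    by_cases h : s = "both" <;> simp [h]
  by_cases hm : my_sources = []
  · simp only [hm, ne_eq, not_true_eq_false, if_false, if_true]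
    rw [pv_product_eq_decode _ (hne _), pv_pools_eq, pv_sources_loop_eq]
    by_cases hz : ((PySem.Dict.ofList ((PySem.Dict.ofList yaml_data).getD "arguments" [])).size : Int) = 0
    · have hv : (PySem.Dict.ofList ((PySem.Dict.ofList yaml_data).getD "arguments" [])).values = [] :=
        pv_values_eq_nil _ (by exact_mod_cast hz)
      simp [hz, hv]
    · by_cases hc : (PySem.Dict.ofList yaml_data).contains "arguments" = true
      · have hzn : ¬ (PySem.Dict.ofList ((PySem.Dict.ofList yaml_data).getD "arguments" [])).size = 0 :=
          fun h => hz (by simp [h])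
        simp [hc, hzn, List.map_map]
      · exfalso
        have hgd : (PySem.Dict.ofList yaml_data).getD "arguments" [] = [] :=
          PySem.Dict.getD_of_not_contains _ _ (by simpa using hc)
        rw [hgd] at hz
        exact hz rfl
  · simp only [hm, ne_eq, not_false_eq_true, if_true]
    rw [pv_product_eq_decode _ (hne _), pv_pools_eq]
    simp
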